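-- pv_equiv track=rewrite | github.com/bayu-siddhi/indonesia-it-law-graph-rag | src/prep/regulation_parser/parser.py | _next_label
-- ===== SOURCE A (Python) =====
-- def _next_label(label: str) -> str:
--     """
--     Generate the next label in a sequence where letters increment
--     alphabetically.
--
--     If a letter is not "Z", it is incremented. If it is "Z", it becomes
--     "A", and the incrementation continues to the left.
--
--     Args:
--         label (str): The input label consisting of uppercase letters.
--
--     Returns:
--         str: The next label in the sequence.
--
--     Example:
--         _next_label("A") -> "B"
--         _next_label("B") -> "C"
--         _next_label("ABC") -> "ABD"
--         _next_label("ZZZ") -> "AAAA"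
--         _next_label("AZZ") -> "BAA"
--     """
--     # Convert string to a list of characters for manipulation
--     label = list(label)
--
--     # Iterate backwards to handle letter increment
--     for i in range(len(label) - 1, -1, -1):
--         if label[i] != "Z":
--             # Increment the letter
--             label[i] = chr(ord(label[i]) + 1)
--             return "".join(label)
--         # If "Z", change to "A"
--         # and continue to the previous letter
--         label[i] = "A"
--
--     # If all were "Z", add "A" in front
--     return "A" + "".join(label)
-- ===== SOURCE B (Python) =====
-- def _next_label(label: str) -> str:
--     stripped = label.rstrip("Z")
--     if not stripped:
--         return "A" * (len(label) + 1)
--     return stripped[:-1] + chr(ord(stripped[-1]) + 1) + "A" * (len(label) - len(stripped))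
-- ===== Notes on version B (the rewrite author's own statement) =====
-- stated objective: simpler
-- what changed: Replaces the in-place backward carry loop over a character list with a loop-free formula: strip the trailing run of final letters with rstrip, bump the last remaining character, and pad with the carried letters.
import Mathlib
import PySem

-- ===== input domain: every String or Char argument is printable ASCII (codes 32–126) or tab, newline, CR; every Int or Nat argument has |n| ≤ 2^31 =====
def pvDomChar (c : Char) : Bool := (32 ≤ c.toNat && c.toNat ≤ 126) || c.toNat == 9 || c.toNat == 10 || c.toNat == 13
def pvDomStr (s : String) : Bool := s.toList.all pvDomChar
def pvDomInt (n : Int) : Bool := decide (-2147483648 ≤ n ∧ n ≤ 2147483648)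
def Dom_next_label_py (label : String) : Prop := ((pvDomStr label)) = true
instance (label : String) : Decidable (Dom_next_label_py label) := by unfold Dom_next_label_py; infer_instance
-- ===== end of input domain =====

-- B replaces A's in-place backward carry loop with a loop-free rstrip("Z") + slice/concat formula (simpler; same cost).

-- ===== PORT A =====
-- A's backward for-loop over the mutable char list, as recursion over the reversed char list:
-- head = current (rightmost unprocessed) char; early return becomes `some`, falling off the loop `none`.
def nextLabelLoopA : List Char → Option (List Char)
  | [] => none
  | c :: rest =>
    if c ≠ 'Z' then some (rest.reverse ++ [Char.ofNat (c.toNat + 1)])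
    else (nextLabelLoopA rest).map (· ++ ['A'])

def next_label_py (label : String) : String :=
  match nextLabelLoopA label.toList.reverse with
  | some cs => String.mk cs
  | none => String.mk ('A' :: label.toList.map (fun _ => 'A'))  -- all were "Z": "A" + join of the all-'A' list

-- ===== PORT B =====
def next_label_py_alt (label : String) : String :=
  -- label.rstrip("Z") ported by hand (exact: drops exactly the trailing 'Z' characters)
  let stripped : List Char := (label.toList.reverse.dropWhile (· == 'Z')).reverse
  if stripped = [] then String.mk (List.replicate (label.toList.length + 1) 'A')
  else String.mk (stripped.dropLast ++ [Char.ofNat (stripped.getLast!.toNat + 1)]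
        ++ List.replicate (label.toList.length - stripped.length) 'A')

-- ===== PRECONDITION & SPEC =====
def Spec_next_label_py (label : String) (out : String) : Prop := out = next_label_py_alt label
instance (label : String) (out : String) : Decidable (Spec_next_label_py label out) := by unfold Spec_next_label_py; infer_instance

-- ===== CLAIM (what is proved, stated in full; the proofs are below) =====
def Claim_equal_next_label_py : Prop := ∀ (label : String), Dom_next_label_py label → Spec_next_label_py label (next_label_py label)

-- ===== LEMMAS AND PROOFS =====

-- A's result as a total function of the reversed char list (the top-level fallback folded in).
def aOut (r : List Char) : List Char :=
  match nextLabelLoopA r with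
  | some cs => cs
  | none => 'A' :: List.replicate r.length 'A'

-- B's result as a function of the reversed char list.
def bOut (r : List Char) : List Char :=
  let t := r.dropWhile (· == 'Z')
  if t = [] then List.replicate (r.length + 1) 'A'
  else t.reverse.dropLast ++ [Char.ofNat (t.reverse.getLast!.toNat + 1)]
        ++ List.replicate (r.length - t.length) 'A'

lemma getLast!_concat_char (xs : List Char) (c : Char) : (xs ++ [c]).getLast! = c := by
  cases xs with
  | nil => rfl
  | cons a as => simp [List.getLast!]

lemma aOut_cons_Z (r : List Char) : aOut ('Z' :: r) = aOut r ++ ['A'] := by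
  unfold aOut
  cases h : nextLabelLoopA r with
  | none => simp [nextLabelLoopA, h, List.replicate_succ']
  | some cs => simp [nextLabelLoopA, h]

lemma bOut_cons_Z (r : List Char) : bOut ('Z' :: r) = bOut r ++ ['A'] := by
  unfold bOut
  cases h : r.dropWhile (· == 'Z') with
  | nil => simp [List.dropWhile, h, List.replicate_succ']
  | cons c rest =>
    have hlen : (r.dropWhile (· == 'Z')).length ≤ r.length := List.length_dropWhile_le _ _
    rw [h] at hlen
    simp only [List.length_cons] at hlen
    simp only [List.dropWhile, h]
    have h2 : r.length - rest.length = (r.length - (rest.length + 1)) + 1 := by omega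
    simp only [List.length_cons]
    simp [h2, List.replicate_succ', List.append_assoc]

lemma aOut_eq_bOut (r : List Char) : aOut r = bOut r := by
  induction r with
  | nil => decide
  | cons c r ih =>
    by_cases hc : c = 'Z'
    · subst hc; rw [aOut_cons_Z, bOut_cons_Z, ih]
    · unfold aOut bOut
      have hcb : (c == 'Z') = false := by simp [hc]
      have hd : List.dropWhile (fun x => x == 'Z') (c :: r) = c :: r := by
        simp [List.dropWhile, hcb]
      simp only [nextLabelLoopA, hd]
      simp [hc, getLast!_concat_char, List.dropLast_concat]

lemma portA_eq_aOut (label : String) :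
    next_label_py label = String.mk (aOut label.toList.reverse) := by
  unfold next_label_py aOut
  cases h : nextLabelLoopA label.toList.reverse with
  | none => simp [List.map_const']
  | some cs => simp

lemma portB_eq_bOut (label : String) :
    next_label_py_alt label = String.mk (bOut label.toList.reverse) := by
  unfold next_label_py_alt bOut
  cases h : label.toList.reverse.dropWhile (· == 'Z') with
  | nil => simp [h]
  | cons c rest =>
    have hne : ¬ ((c :: rest).reverse = ([] : List Char)) := by simp
    simp [h, hne]

-- ===== VERDICT (by name: the statement is the Claim_ definition above) =====
theorem next_label_py_spec : Claim_equal_next_label_py := by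
  intro label _
  unfold Spec_next_label_py
  rw [portA_eq_aOut, portB_eq_bOut, aOut_eq_bOut]
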